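-- pv_equiv track=rewrite | github.com/xiexingzhu/hackerrank | datastructure/Vertical Sticks.py | sumlen
-- ===== SOURCE A (Python) =====
-- def sumlen(a):
--     tmp=[[a[0],1]]
--     count=1
--
--     for i in range(1,len(a)):
--         Count=0
--         while(len(tmp)>0 and a[i]>tmp[-1][0]):
--             Count+=tmp[-1][1]
--             tmp.pop()
--         Count+=1
--         tmp.append([a[i],Count])
--         count+=Count
--
--     return count
-- ===== SOURCE B (Python) =====
-- def sumlen(a):
--     total = 0
--     for i in range(len(a)):
--         j = i - 1
--         while j >= 0 and a[j] < a[i]: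
--             j -= 1
--         total += i - j
--     return total
-- ===== Notes on version B (the rewrite author's own statement) =====
-- stated objective: simpler
-- what changed: Replaces the monotonic stack (value/run-count pairs, popped and re-pushed per element) by a direct per-element leftward scan to the nearest previous element >= a[i], adding i-j per index; B also returns 0 on the empty list where A raises.
-- outside the precondition, e.g. on sumlen([]): A raises IndexError, B returns 0
-- crash fix: On the empty list A raises IndexError (it reads a[0] before the loop); B returns 0, the sum over no sticks. — e.g. on sumlen([]): A raises IndexError, B returns 0
import Mathlib
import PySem

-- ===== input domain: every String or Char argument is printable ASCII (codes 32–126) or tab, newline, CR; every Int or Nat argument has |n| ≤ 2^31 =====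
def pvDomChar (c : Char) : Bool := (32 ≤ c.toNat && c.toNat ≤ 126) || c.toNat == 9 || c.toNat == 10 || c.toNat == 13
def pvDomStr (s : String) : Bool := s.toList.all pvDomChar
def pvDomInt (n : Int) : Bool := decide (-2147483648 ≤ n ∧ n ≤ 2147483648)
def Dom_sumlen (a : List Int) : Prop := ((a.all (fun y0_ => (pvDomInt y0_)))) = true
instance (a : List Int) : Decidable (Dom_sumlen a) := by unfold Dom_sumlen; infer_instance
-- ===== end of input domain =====

-- B replaces A's monotonic stack by a direct per-element leftward scan to the nearest
-- previous element ≥ a[i] (objective: simpler; same return value on every nonempty list).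

-- shared helper: Python's a[i] on an index known to be in range (0 fallback is never hit inside Pre_)
def pvGet (a : List Int) (i : Int) : Int := (PySem.List.pyGet? a i).getD 0

-- ===== PORT A =====
-- stack 'tmp' is held head-first: the list head is Python's tmp[-1] (top of stack)
def sumlenPop (ai : Int) : List (Int × Int) → Int → List (Int × Int) × Int
  | [], c => ([], c)
  | (v, n) :: rest, c => if ai > v then sumlenPop ai rest (c + n) else ((v, n) :: rest, c)

def sumlenStep (a : List Int) (st : List (Int × Int) × Int) (i : Int) : List (Int × Int) × Int :=
  let ai := pvGet a i
  let p := sumlenPop ai st.1 0       -- the while loop: pop while a[i] > top value, accumulating counts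
  let c := p.2 + 1                   -- Count += 1
  ((ai, c) :: p.1, st.2 + c)         -- tmp.append([a[i], Count]); count += Count

def sumlen (a : List Int) : Int :=
  ((PySem.List.pyRange 1 (a.length : Int) 1).foldl (sumlenStep a) ([(pvGet a 0, 1)], 1)).2

-- ===== PORT B =====
-- the while loop 'j >= 0 and a[j] < a[i]: j -= 1', fuel = j+1; returns the final j (may be -1)
def sumlenScan (a : List Int) (ai : Int) : Nat → Int
  | 0 => -1
  | k + 1 => if pvGet a (k : Int) < ai then sumlenScan a ai k else (k : Int)

def sumlenBStep (a : List Int) (total : Int) (i : Int) : Int :=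
  total + (i - sumlenScan a (pvGet a i) i.toNat)

def sumlen_alt (a : List Int) : Int :=
  (PySem.List.pyRange 0 (a.length : Int) 1).foldl (sumlenBStep a) 0

-- ===== PRECONDITION & SPEC =====
-- Pre_ excludes only the empty list, on which Python A raises IndexError (a[0]).
def Pre_sumlen (a : List Int) : Prop := a ≠ []
instance (a : List Int) : Decidable (Pre_sumlen a) := by unfold Pre_sumlen; infer_instance
def pvWitness_sumlen : List Int := [2, 1, 3]

-- On the empty list A raises IndexError while B returns 0 (the sum over no sticks).
def Raises_sumlen (a : List Int) : Prop := a = []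
instance (a : List Int) : Decidable (Raises_sumlen a) := by unfold Raises_sumlen; infer_instance
def pvRaiseWitness_sumlen : List Int := []
def pvRaiseWitnessOut_sumlen : Int := 0

def Spec_sumlen (a : List Int) (out : Int) : Prop := out = sumlen_alt a
instance (a : List Int) (out : Int) : Decidable (Spec_sumlen a out) := by unfold Spec_sumlen; infer_instance

-- ===== CLAIM (what is proved, stated in full; the proofs are below) =====
def Claim_equal_sumlen : Prop := ∀ (a : List Int), Dom_sumlen a → Pre_sumlen a → Spec_sumlen a (sumlen a)
def Claim_raises_sumlen : Prop := (∀ (a : List Int), Dom_sumlen a → Raises_sumlen a → ¬ Pre_sumlen a) ∧ (Dom_sumlen (pvRaiseWitness_sumlen) ∧ Raises_sumlen (pvRaiseWitness_sumlen) ∧ sumlen_alt (pvRaiseWitness_sumlen) = pvRaiseWitnessOut_sumlen)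

-- ===== LEMMAS AND PROOFS =====

theorem scan_lb (a : List Int) (ai : Int) (k : Nat) : -1 ≤ sumlenScan a ai k := by
  induction k with
  | zero => simp [sumlenScan]
  | succ k ih => simp only [sumlenScan]; split <;> omega

theorem scan_ub (a : List Int) (ai : Int) (k : Nat) : sumlenScan a ai k < (k : Int) := by
  induction k with
  | zero => simp [sumlenScan]
  | succ k ih => simp only [sumlenScan]; split <;> push_cast <;> omega

theorem scan_skip (a : List Int) (ai : Int) (k : Nat) :
    ∀ t : Nat, sumlenScan a ai k < (t : Int) → t < k → pvGet a (t : Int) < ai := by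
  induction k with
  | zero => intro t _ ht; omega
  | succ k ih =>
    intro t h1 h2
    simp only [sumlenScan] at h1
    split at h1
    · rcases Nat.lt_or_ge t k with h | h
      · exact ih t h1 h
      · have : t = k := by omega
        subst this; assumption
    · omega

theorem scan_stop (a : List Int) (ai : Int) (k : Nat) :
    0 ≤ sumlenScan a ai k → ¬ pvGet a (sumlenScan a ai k) < ai := by
  induction k with
  | zero => intro h; simp [sumlenScan] at h
  | succ k ih =>
    by_cases h : pvGet a (k : Int) < ai
    · simp only [sumlenScan, if_pos h]; exact ih
    · simp only [sumlenScan, if_neg h]; intro _; exact h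

theorem scan_unique (a : List Int) (ai : Int) (k : Nat) :
    ∀ j : Int, -1 ≤ j → j < (k : Int) → (0 ≤ j → ¬ pvGet a j < ai) →
      (∀ t : Nat, j < (t : Int) → t < k → pvGet a (t : Int) < ai) → sumlenScan a ai k = j := by
  induction k with
  | zero => intro j h1 h2 _ _; simp [sumlenScan]; omega
  | succ k ih =>
    intro j h1 h2 hstop hskip
    simp only [sumlenScan]
    by_cases hk : pvGet a (k : Int) < ai
    · rw [if_pos hk]
      have hjk : j < (k : Int) := by
        rcases lt_or_eq_of_le (by omega : j ≤ (k : Int)) with h | h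
        · exact h
        · exfalso; exact hstop (by omega) (by rw [h]; exact hk)
      exact ih j h1 hjk hstop (fun t ht1 ht2 => hskip t ht1 (by omega))
    · rw [if_neg hk]
      by_contra hne
      have hjk : j < (k : Int) := by omega
      exact hk (hskip k hjk (by omega))

theorem scan_trans (a : List Int) (ai : Int) (m : Nat) (h : pvGet a (m : Int) < ai) :
    sumlenScan a ai (m + 1) = sumlenScan a ai (sumlenScan a (pvGet a (m : Int)) m + 1).toNat := by
  have hj1lb := scan_lb a (pvGet a (m : Int)) m
  have hj1ub := scan_ub a (pvGet a (m : Int)) m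
  set j1 := sumlenScan a (pvGet a (m : Int)) m with hj1
  have hf : ((j1 + 1).toNat : Int) = j1 + 1 := by omega
  set f := (j1 + 1).toNat with hfdef
  have hjlb := scan_lb a ai f
  have hjub := scan_ub a ai f
  apply scan_unique
  · exact hjlb
  · push_cast; omega
  · exact scan_stop a ai f
  · intro t ht1 ht2
    rcases Nat.lt_or_ge t f with hlt | hge
    · exact scan_skip a ai f t ht1 hlt
    · rcases Nat.lt_or_ge t m with htm | htm
      · have : pvGet a (t : Int) < pvGet a (m : Int) :=
          scan_skip a (pvGet a (m : Int)) m t (by omega) htm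
        omega
      · have : t = m := by omega
        subst this; exact h

-- the stack A holds after processing the first m elements, characterised via B's scan
def stackOf (a : List Int) : Nat → List (Int × Int)
  | 0 => []
  | m + 1 =>
    (pvGet a (m : Int), (m : Int) - sumlenScan a (pvGet a (m : Int)) m) ::
      stackOf a (sumlenScan a (pvGet a (m : Int)) m + 1).toNat
  decreasing_by
    have h1 := scan_ub a (pvGet a (m : Int)) m
    have h2 := scan_lb a (pvGet a (m : Int)) m
    omega

theorem pop_stack (a : List Int) (m : Nat) :
    ∀ ai c, sumlenPop ai (stackOf a m) c =
      (stackOf a (sumlenScan a ai m + 1).toNat,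
        c + ((m : Int) - 1 - sumlenScan a ai m)) := by
  induction m using Nat.strong_induction_on with
  | _ m ih =>
    intro ai c
    match m with
    | 0 => simp [stackOf, sumlenPop, sumlenScan]
    | m + 1 =>
      rw [stackOf]
      have hj1lb := scan_lb a (pvGet a (m : Int)) m
      have hj1ub := scan_ub a (pvGet a (m : Int)) m
      set j1 := sumlenScan a (pvGet a (m : Int)) m with hj1
      by_cases h : pvGet a (m : Int) < ai
      · rw [sumlenPop, if_pos (by exact h)]
        have hflt : (j1 + 1).toNat < m + 1 := by omega
        rw [ih _ hflt]
        have hst := scan_trans a ai m h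
        rw [← hj1] at hst
        rw [hst]
        simp only [Prod.mk.injEq]
        refine ⟨by trivial, ?_⟩
        have hfc : (((j1 + 1).toNat : Int)) = j1 + 1 := by omega
        rw [hfc]
        push_cast
        ring
      · rw [sumlenPop, if_neg (by exact h)]
        have hs : sumlenScan a ai (m + 1) = (m : Int) := by
          simp only [sumlenScan]; rw [if_neg h]
        rw [hs]
        have ht : ((m : Int) + 1).toNat = m + 1 := by omega
        rw [ht, stackOf, ← hj1]
        simp only [Prod.mk.injEq]
        refine ⟨by trivial, ?_⟩
        push_cast
        ring

theorem loop_eq (a : List Int) (m : Nat) :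
    (PySem.List.pyRange 1 ((m : Int) + 1) 1).foldl (sumlenStep a) ([(pvGet a 0, 1)], 1) =
      (stackOf a (m + 1), (PySem.List.pyRange 0 ((m : Int) + 1) 1).foldl (sumlenBStep a) 0) := by
  induction m with
  | zero =>
    simp only [Nat.cast_zero, zero_add]
    have e1 : PySem.List.pyRange 1 1 1 = ([] : List Int) := PySem.List.pyRange_one_eq_nil (by norm_num)
    have e2 : PySem.List.pyRange 0 1 1 = [(0 : Int)] := PySem.List.pyRange_one_singleton 0
    rw [e1, e2, stackOf]
    simp [sumlenScan, sumlenBStep, stackOf, List.foldl]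
  | succ m ih =>
    push_cast
    rw [PySem.List.pyRange_one_succ_right (by omega : (1:Int) ≤ (m:Int) + 1),
        PySem.List.pyRange_one_succ_right (by omega : (0:Int) ≤ (m:Int) + 1)]
    rw [List.foldl_append, List.foldl_append, ih]
    simp only [List.foldl_cons, List.foldl_nil]
    simp only [sumlenStep, sumlenBStep]
    have hm1 : (m : Int) + 1 = ((m + 1 : Nat) : Int) := by push_cast; ring
    rw [hm1]
    rw [pop_stack a (m + 1)]
    rw [show ((m + 1 : Nat) : Int).toNat = m + 1 by omega]
    rw [show (m + 1 + 1 : Nat) = (m + 1) + 1 from rfl, stackOf]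
    simp only [Prod.mk.injEq, List.cons.injEq]
    refine ⟨⟨⟨by trivial, by ring⟩, by trivial⟩, by push_cast; ring⟩

-- ===== VERDICT (by name: the statement is the Claim_ definition above) =====
theorem sumlen_spec : Claim_equal_sumlen := by
  intro a _ hpre
  unfold Spec_sumlen sumlen sumlen_alt
  obtain ⟨m, hm⟩ : ∃ m, a.length = m + 1 := by
    cases a with
    | nil => exact absurd rfl hpre
    | cons x xs => exact ⟨xs.length, rfl⟩
  rw [hm]
  push_cast
  rw [loop_eq a m]

@[simp] theorem sumlen_raises : Claim_raises_sumlen := by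
  unfold Claim_raises_sumlen
  constructor
  · intro a _ hr
    unfold Raises_sumlen at hr
    unfold Pre_sumlen
    simp [hr]
  · exact ⟨by decide, rfl, by decide⟩
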